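-- pv_equiv track=rewrite | github.com/Ventus-Work/PDF-OCR | ps-docparser/parsers/header_utils.py | _forward_fill_parent_headers
-- ===== SOURCE A (Python) =====
-- def _forward_fill_parent_headers(header_rows: list[list[str]]) -> list[list[str]]:
--     """
--     다단 헤더의 상위 빈 칸을 좌측 부모 헤더로 보완한다.
--
--     Why:
--         colspan 이 확장된 결과 `["재료비", "", "노무비", ""]` 형태가 생기면,
--         같은 열의 하위 헤더("금액" 등)와 단순 세로 결합 시 bare key 만 남는다.
--         하위 헤더가 존재하는 경우에만 부모를 우측 전개해 `재료비_금액` 같은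
--         완전한 composite key 를 만든다.
--     """
--     if len(header_rows) < 2:
--         return header_rows
--
--     filled_rows = [row[:] for row in header_rows]
--     n_rows = len(filled_rows)
--     n_cols = len(filled_rows[0]) if filled_rows else 0
--
--     for row_idx in range(n_rows - 1):
--         last_parent = ""
--         for col_idx in range(n_cols):
--             current = filled_rows[row_idx][col_idx]
--             if current:
--                 last_parent = current
--                 continue
--
--             has_child = any(
--                 filled_rows[child_row][col_idx]
--                 for child_row in range(row_idx + 1, n_rows)
--             )
--             if last_parent and has_child:
--                 filled_rows[row_idx][col_idx] = last_parent
--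
--     return filled_rows
-- ===== SOURCE B (Python) =====
-- def _forward_fill_parent_headers(header_rows: list[list[str]]) -> list[list[str]]:
--     if len(header_rows) < 2:
--         return header_rows
--
--     n_cols = len(header_rows[0])
--
--     # One bottom-up pass: for each row, record whether any cell strictly below
--     # in each column is non-empty, then fill each row in a single left-to-right pass.
--     below_tables = []
--     has_below = [False] * n_cols
--     for row in reversed(header_rows):
--         below_tables.append(has_below)
--         has_below = [hb or bool(row[c]) for c, hb in enumerate(has_below)]
--     below_tables.reverse()
--
--     result = []
--     last_idx = len(header_rows) - 1
--     for i, row in enumerate(header_rows):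
--         if i == last_idx:
--             result.append(row[:])
--             continue
--         hb = below_tables[i]
--         new_row = []
--         last_parent = ""
--         for c in range(n_cols):
--             cur = row[c]
--             if cur:
--                 last_parent = cur
--                 new_row.append(cur)
--             elif last_parent and hb[c]:
--                 new_row.append(last_parent)
--             else:
--                 new_row.append(cur)
--         new_row.extend(row[n_cols:])
--         result.append(new_row)
--     return result
-- ===== Notes on version B (the rewrite author's own statement) =====
-- stated objective: alternative
-- what changed: Replaces A's per-empty-cell rescan of all lower rows with one bottom-up pass precomputing a per-row, per-column 'has non-empty cell below' table, then a single left-to-right fill pass per row; the per-cell inner scan disappears.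
-- outside the precondition, e.g. on _forward_fill_parent_headers([['', 'x'], ['y']]): A returns [['', 'x'], ['y']], B raises IndexError
import Mathlib
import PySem

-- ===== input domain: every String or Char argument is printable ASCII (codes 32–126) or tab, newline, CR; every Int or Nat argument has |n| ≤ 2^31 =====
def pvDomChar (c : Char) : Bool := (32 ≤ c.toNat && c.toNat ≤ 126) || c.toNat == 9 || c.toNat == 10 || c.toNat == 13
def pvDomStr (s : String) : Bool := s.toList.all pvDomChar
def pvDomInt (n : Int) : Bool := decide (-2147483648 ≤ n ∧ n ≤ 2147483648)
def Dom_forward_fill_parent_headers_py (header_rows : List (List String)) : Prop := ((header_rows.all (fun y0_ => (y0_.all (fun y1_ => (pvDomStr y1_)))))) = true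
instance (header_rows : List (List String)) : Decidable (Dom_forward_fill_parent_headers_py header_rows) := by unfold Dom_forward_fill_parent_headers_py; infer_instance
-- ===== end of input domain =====

-- B replaces A's per-cell rescan of all lower rows by one bottom-up pass that precomputes,
-- per row, a per-column "has a non-empty cell below" table, then fills each row in a single
-- left-to-right pass (objective: alternative — a different traversal, not measured faster).

-- ===== PORT A =====
-- literal transliteration of A: nested index loops over a mutable copy of the rows
def forward_fill_parent_headers_py (header_rows : List (List String)) : List (List String) :=
  if header_rows.length < 2 then header_rows
  else
    let filled0 := header_rows.map (fun row => row)   -- [row[:] for row in header_rows]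
    let nRows : Int := (filled0.length : Int)
    let nCols : Int := if filled0 ≠ [] then ((filled0.headD []).length : Int) else 0
    (PySem.List.pyRange 0 (nRows - 1) 1).foldl (fun filled rowIdx =>
      ((PySem.List.pyRange 0 nCols 1).foldl (fun (st : String × List (List String)) colIdx =>
        let current := PySem.List.pyGetD (PySem.List.pyGetD st.2 rowIdx []) colIdx ""
        if current ≠ "" then (current, st.2)
        else
          let hasChild := (PySem.List.pyRange (rowIdx + 1) nRows 1).any (fun childRow =>
            PySem.List.pyGetD (PySem.List.pyGetD st.2 childRow []) colIdx "" ≠ "")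
          if st.1 ≠ "" ∧ hasChild then
            (st.1, PySem.List.pySetD st.2 rowIdx
                     (PySem.List.pySetD (PySem.List.pyGetD st.2 rowIdx []) colIdx st.1))
          else (st.1, st.2)) ("", filled)).2) filled0

-- ===== PORT B =====
-- bottom-up pass collecting, for each row, the per-column "non-empty cell strictly below" table
-- (rows are given already reversed, as Source B iterates reversed(header_rows))
def pvBelowTables (rowsRev : List (List String)) (hb : List Bool) : List (List Bool) :=
  match rowsRev with
  | [] => []
  | row :: rest =>
      hb :: pvBelowTables rest (hb.mapIdx (fun c b => b || (row.getD c "" ≠ "")))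

-- single left-to-right fill pass over one row (Source B's inner `for c in range(n_cols)` loop)
def pvFillRow (row : List String) (hb : List Bool) (nCols : Nat) : List String :=
  (((List.range nCols).foldl (fun (st : String × List String) c =>
      let cur := row.getD c ""
      if cur ≠ "" then (cur, st.2 ++ [cur])
      else if st.1 ≠ "" ∧ hb.getD c false then (st.1, st.2 ++ [st.1])
      else (st.1, st.2 ++ [cur])) ("", [])).2) ++ row.drop nCols

def forward_fill_parent_headers_py_alt (header_rows : List (List String)) : List (List String) :=
  if header_rows.length < 2 then header_rows
  else
    let nCols := (header_rows.headD []).length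
    let tables := (pvBelowTables header_rows.reverse (List.replicate nCols false)).reverse
    let lastIdx := header_rows.length - 1
    header_rows.zipIdx.map (fun p =>
      if p.2 = lastIdx then p.1
      else pvFillRow p.1 (tables.getD p.2 []) nCols)

-- ===== PRECONDITION & SPEC =====
-- Pre_ excludes ragged tables (some row shorter than the first row, with at least 2 rows):
-- there A raises IndexError on most of them and, where its short-circuiting `any` happens to
-- survive, B's full bottom-up pass raises IndexError itself.
def Pre_forward_fill_parent_headers_py (header_rows : List (List String)) : Prop :=
  header_rows.length < 2 ∨
    ∀ row ∈ header_rows, (header_rows.headD []).length ≤ row.length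
instance (header_rows : List (List String)) : Decidable (Pre_forward_fill_parent_headers_py header_rows) := by unfold Pre_forward_fill_parent_headers_py; infer_instance

def pvWitness_forward_fill_parent_headers_py : List (List String) :=
  [["a", "", "b", ""], ["", "x", "", ""], ["p", "q", "r", "s"]]

def Spec_forward_fill_parent_headers_py (header_rows : List (List String)) (out : List (List String)) : Prop := out = forward_fill_parent_headers_py_alt header_rows
instance (header_rows : List (List String)) (out : List (List String)) : Decidable (Spec_forward_fill_parent_headers_py header_rows out) := by unfold Spec_forward_fill_parent_headers_py; infer_instance

-- ===== CLAIM (what is proved, stated in full; the proofs are below) =====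
def Claim_equal_forward_fill_parent_headers_py : Prop := ∀ (header_rows : List (List String)), Dom_forward_fill_parent_headers_py header_rows → Pre_forward_fill_parent_headers_py header_rows → Spec_forward_fill_parent_headers_py header_rows (forward_fill_parent_headers_py header_rows)

-- ===== LEMMAS AND PROOFS =====

-- "column c has a non-empty cell strictly below row i" on the ORIGINAL rows
def hcOrig (rows : List (List String)) (i c : Nat) : Bool :=
  (rows.drop (i+1)).any (fun row => row.getD c "" ≠ "")

-- reference left-to-right fill of columns c .. c+k-1 of one row
def fillSeg (row : List String) (hc : Nat → Bool) : Nat → Nat → String → String × List String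
  | 0, _, last => (last, [])
  | k+1, c, last =>
      let cur := row.getD c ""
      if cur ≠ "" then
        let p := fillSeg row hc k (c+1) cur
        (p.1, cur :: p.2)
      else if last ≠ "" ∧ hc c then
        let p := fillSeg row hc k (c+1) last
        (p.1, last :: p.2)
      else
        let p := fillSeg row hc k (c+1) last
        (p.1, cur :: p.2)

def fillRowRef (rows : List (List String)) (nCols i : Nat) (row : List String) : List String :=
  (fillSeg row (hcOrig rows i) nCols 0 "").2 ++ row.drop nCols

-- state after A has processed the first m rows
def refTake (rows : List (List String)) (nCols m : Nat) : List (List String) :=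
  ((rows.take m).zipIdx.map (fun p => fillRowRef rows nCols p.2 p.1)) ++ rows.drop m

-- A's inner-loop body, named
def pvStepA (r n : Int) (st : String × List (List String)) (colIdx : Int) :
    String × List (List String) :=
  let current := PySem.List.pyGetD (PySem.List.pyGetD st.2 r []) colIdx ""
  if current ≠ "" then (current, st.2)
  else
    let hasChild := (PySem.List.pyRange (r + 1) n 1).any (fun childRow =>
      PySem.List.pyGetD (PySem.List.pyGetD st.2 childRow []) colIdx "" ≠ "")
    if st.1 ≠ "" ∧ hasChild then
      (st.1, PySem.List.pySetD st.2 r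
               (PySem.List.pySetD (PySem.List.pyGetD st.2 r []) colIdx st.1))
    else (st.1, st.2)

-- B's below-table fold, flattened
def updHB (hb : List Bool) (row : List String) : List Bool :=
  hb.mapIdx (fun c b => b || (row.getD c "" ≠ ""))

-- small list helpers
theorem getD_append_len {α : Type} (pref l : List α) (d : α) :
    (pref ++ l).getD pref.length d = l.getD 0 d := by
  induction pref with
  | nil => rfl
  | cons x xs ih => rw [List.cons_append, List.length_cons, List.getD_cons_succ]; exact ih

theorem set_append_len {α : Type} (pref l : List α) (v : α) :
    (pref ++ l).set pref.length v = pref ++ l.set 0 v := by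
  induction pref with
  | nil => rfl
  | cons x xs ih => rw [List.cons_append, List.length_cons, List.set_cons_succ, ih]; rfl

theorem drop_eq_getD_cons {α : Type} (l : List α) (c : Nat) (hc : c < l.length) (d : α) :
    l.drop c = l.getD c d :: l.drop (c+1) := by
  rw [List.drop_eq_getElem_cons hc, List.getD_eq_getElem l d hc]

-- fillSeg only looks at hc on [c, c+k)
theorem fillSeg_congr (row : List String) (hc hc' : Nat → Bool) :
    ∀ (k c : Nat) (last : String), (∀ j, c ≤ j → j < c + k → hc j = hc' j) →
    fillSeg row hc k c last = fillSeg row hc' k c last := by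
  intro k
  induction k with
  | zero => intro c last h; rfl
  | succ k ih =>
    intro c last h
    have hrest : ∀ last', fillSeg row hc k (c+1) last' = fillSeg row hc' k (c+1) last' :=
      fun last' => ih (c+1) last' (fun j hj1 hj2 => h j (by omega) (by omega))
    simp only [fillSeg, h c le_rfl (by omega), hrest]

-- B's inner fold accumulates fillSeg
theorem fillB_aux (row : List String) (hb : List Bool) :
    ∀ (k c : Nat) (last : String) (acc : List String),
    (List.range' c k).foldl (fun (st : String × List String) c =>
      let cur := row.getD c ""
      if cur ≠ "" then (cur, st.2 ++ [cur])
      else if st.1 ≠ "" ∧ hb.getD c false then (st.1, st.2 ++ [st.1])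
      else (st.1, st.2 ++ [cur])) (last, acc)
    = ((fillSeg row (fun j => hb.getD j false) k c last).1,
       acc ++ (fillSeg row (fun j => hb.getD j false) k c last).2) := by
  intro k
  induction k with
  | zero => intro c last acc; simp [fillSeg]
  | succ k ih =>
    intro c last acc
    rw [List.range'_succ, List.foldl_cons]
    by_cases h1 : row.getD c "" ≠ ""
    · simp only [if_pos h1, ih, fillSeg]
      simp
    · by_cases h2 : last ≠ "" ∧ hb.getD c false
      · simp only [if_neg h1, if_pos h2, ih, fillSeg]
        simp
      · simp only [if_neg h1, if_neg h2, ih, fillSeg]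
        simp

theorem pvFillRow_eq (row : List String) (hb : List Bool) (nCols : Nat) :
    pvFillRow row hb nCols
    = (fillSeg row (fun j => hb.getD j false) nCols 0 "").2 ++ row.drop nCols := by
  unfold pvFillRow
  rw [List.range_eq_range', fillB_aux]
  simp

-- pvBelowTables indexing
theorem pvBelowTables_length (l : List (List String)) (hb : List Bool) :
    (pvBelowTables l hb).length = l.length := by
  induction l generalizing hb with
  | nil => rfl
  | cons r rest ih => simp [pvBelowTables, ih]

theorem pvBelowTables_getD (l : List (List String)) :
    ∀ (j : Nat) (hb : List Bool), j < l.length →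
    (pvBelowTables l hb).getD j [] = (l.take j).foldl updHB hb := by
  induction l with
  | nil => intro j hb hj; simp at hj
  | cons r rest ih =>
    intro j hb hj
    cases j with
    | zero => rfl
    | succ j =>
      show (pvBelowTables rest (updHB hb r)).getD j [] = _
      rw [ih j (updHB hb r) (by simpa using hj)]
      rfl

theorem updHB_length (hb : List Bool) (row : List String) : (updHB hb row).length = hb.length := by
  simp [updHB]

theorem updFold_getD (nCols : Nat) :
    ∀ (L : List (List String)) (hb : List Bool) (c : Nat), hb.length = nCols → c < nCols →
    ((L.foldl updHB hb).getD c false) = (hb.getD c false || L.any (fun row => row.getD c "" ≠ "")) := by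
  intro L
  induction L with
  | nil => intro hb c _ _; simp
  | cons row L ih =>
    intro hb c hlen hc
    rw [List.foldl_cons, ih (updHB hb row) c (by rw [updHB_length, hlen]) hc]
    have hcl : c < hb.length := by omega
    have : (updHB hb row).getD c false = (hb.getD c false || (row.getD c "" ≠ "")) := by
      rw [List.getD_eq_getElem _ _ (by simpa [updHB_length] using hcl),
          List.getD_eq_getElem _ _ hcl]
      simp [updHB]
    rw [this, List.any_cons, Bool.or_assoc]

-- the table B hands to row i agrees with hcOrig
theorem tables_getD (rows : List (List String)) (nCols i c : Nat)
    (hi : i < rows.length) (hc : c < nCols) :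
    (((pvBelowTables rows.reverse (List.replicate nCols false)).reverse.getD i []).getD c false)
    = hcOrig rows i c := by
  have hlenpv : (pvBelowTables rows.reverse (List.replicate nCols false)).length = rows.length := by
    rw [pvBelowTables_length, List.length_reverse]
  have hi' : i < (pvBelowTables rows.reverse (List.replicate nCols false)).reverse.length := by
    simpa [hlenpv] using hi
  rw [List.getD_eq_getElem _ _ hi', List.getElem_reverse]
  have hj : rows.length - 1 - i < rows.reverse.length := by simp; omega
  have := pvBelowTables_getD rows.reverse (rows.length - 1 - i) (List.replicate nCols false)
      (by simpa using hj)
  rw [← List.getD_eq_getElem _ ([] : List Bool)]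
  rw [hlenpv]
  rw [this]
  rw [List.take_reverse]
  have hdrop : rows.length - (rows.length - 1 - i) = i + 1 := by omega
  rw [hdrop]
  rw [updFold_getD nCols _ _ _ (by simp) hc]
  simp [hcOrig, List.any_reverse]

-- any over an index range = any over the dropped suffix
theorem any_pyRange_drop (xs : List (List String)) (a : Nat) (p : List String → Bool) :
    ((PySem.List.pyRange (a : Int) (xs.length : Int) 1).any
       (fun j => p (PySem.List.pyGetD xs j []))) = (xs.drop a).any p := by
  have h := PySem.List.map_pyGetD_pyRange' (α := List String) xs [] (a := (a : Int)) (by positivity)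
  calc ((PySem.List.pyRange (a : Int) (xs.length : Int) 1).any (fun j => p (PySem.List.pyGetD xs j [])))
      = ((PySem.List.pyRange (a : Int) (xs.length : Int) 1).map (fun j => PySem.List.pyGetD xs j [])).any p := by
        rw [List.any_map]; rfl
    _ = (xs.drop a).any p := by rw [h]; simp

-- refTake basic facts
theorem refTake_length (rows : List (List String)) (nCols m : Nat) (hm : m ≤ rows.length) :
    (refTake rows nCols m).length = rows.length := by
  simp [refTake, min_eq_left hm]
  omega

theorem refTake_drop (rows : List (List String)) (nCols m k : Nat) (hmk : m ≤ k) (hm : m ≤ rows.length) :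
    (refTake rows nCols m).drop k = rows.drop k := by
  unfold refTake
  have hlen : ((rows.take m).zipIdx.map (fun p => fillRowRef rows nCols p.2 p.1)).length = m := by
    simp [min_eq_left hm]
  rw [List.drop_append]
  have h0 : List.drop k ((rows.take m).zipIdx.map (fun p => fillRowRef rows nCols p.2 p.1)) = [] :=
    List.drop_eq_nil_of_le (by omega)
  rw [h0, hlen, List.drop_drop]
  have : m + (k - m) = k := by omega
  rw [this, List.nil_append]

-- A's inner loop = fillSeg, as a row update
theorem innerA (base : List (List String)) (r : Nat) (hr : r < base.length) (hc : Nat → Bool)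
    (hhc : ∀ (c : Nat) (X : List String),
      ((PySem.List.pyRange ((r : Int) + 1) ((base.length : Int)) 1).any (fun childRow =>
        PySem.List.pyGetD (PySem.List.pyGetD (PySem.List.pySetD base (r : Int) X) childRow []) (c : Int) "" ≠ ""))
      = hc c) :
    ∀ (k c : Nat) (last : String) (pref : List String), pref.length = c →
      c + k ≤ (base.getD r []).length →
    (PySem.List.pyRange (c : Int) ((c + k : Nat) : Int) 1).foldl
        (pvStepA (r : Int) (base.length : Int))
        (last, PySem.List.pySetD base (r : Int) (pref ++ (base.getD r []).drop c))
    = ((fillSeg (base.getD r []) hc k c last).1,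
       PySem.List.pySetD base (r : Int)
         (pref ++ (fillSeg (base.getD r []) hc k c last).2 ++ (base.getD r []).drop (c + k))) := by
  intro k
  induction k with
  | zero =>
    intro c last pref hpref hck
    rw [PySem.List.pyRange_one_eq_nil (by push_cast; omega)]
    simp [fillSeg]
  | succ k ih =>
    intro c last pref hpref hck
    subst hpref
    have hcrow : pref.length < (base.getD r []).length := by omega
    have hdrop : (base.getD r []).drop pref.length
        = (base.getD r []).getD pref.length "" :: (base.getD r []).drop (pref.length+1) :=
      drop_eq_getD_cons _ _ hcrow _
    rw [PySem.List.pyRange_one_cons (by push_cast; omega), List.foldl_cons]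
    have hget : PySem.List.pyGetD
        (PySem.List.pySetD base (r:Int) (pref ++ (base.getD r []).drop pref.length)) (r:Int) []
        = pref ++ (base.getD r []).drop pref.length := by
      rw [PySem.List.pyGetD_pySetD_natCast base r r _ [] hr]
      simp
    have hcur : PySem.List.pyGetD (pref ++ (base.getD r []).drop pref.length) (pref.length:Int) ""
        = (base.getD r []).getD pref.length "" := by
      rw [PySem.List.pyGetD_natCast, getD_append_len, hdrop, List.getD_cons_zero]
    have hstep : pvStepA (r:Int) (base.length : Int)
        (last, PySem.List.pySetD base (r:Int) (pref ++ (base.getD r []).drop pref.length)) (pref.length:Int)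
        = (if (base.getD r []).getD pref.length "" ≠ "" then
            ((base.getD r []).getD pref.length "",
             PySem.List.pySetD base (r:Int) (pref ++ (base.getD r []).drop pref.length))
          else if last ≠ "" ∧ hc pref.length then
            (last, PySem.List.pySetD base (r:Int)
              ((pref ++ [last]) ++ (base.getD r []).drop (pref.length+1)))
          else (last, PySem.List.pySetD base (r:Int) (pref ++ (base.getD r []).drop pref.length))) := by
      unfold pvStepA
      simp only [hget, hcur, hhc pref.length (pref ++ (base.getD r []).drop pref.length)]
      by_cases hne : (base.getD r []).getD pref.length "" ≠ ""
      · simp only [if_pos hne]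
      · simp only [if_neg hne]
        by_cases h2 : last ≠ "" ∧ hc pref.length
        · simp only [if_pos h2]
          simp only [PySem.List.pySetD_natCast, List.set_set]
          congr 2
          rw [set_append_len, hdrop, List.set_cons_zero]
          simp
        · simp only [if_neg h2]
    rw [hstep]
    have hsucc : ((pref.length:Int) + 1) = (((pref.length+1 : Nat)) : Int) := by push_cast; ring
    have hend : ((pref.length + (k+1) : Nat) : Int) = (((pref.length+1) + k : Nat) : Int) := by push_cast; ring
    by_cases hne : (base.getD r []).getD pref.length "" ≠ ""
    · rw [if_pos hne, hsucc, hend]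
      have hP : pref ++ (base.getD r []).drop pref.length
          = (pref ++ [(base.getD r []).getD pref.length ""]) ++ (base.getD r []).drop (pref.length+1) := by
        rw [hdrop]; simp
      rw [hP, ih (pref.length+1) ((base.getD r []).getD pref.length "") (pref ++ [(base.getD r []).getD pref.length ""])
            (by simp) (by omega)]
      have hfs : fillSeg (base.getD r []) hc (k+1) pref.length last
          = (((fillSeg (base.getD r []) hc k (pref.length+1) ((base.getD r []).getD pref.length "")).1),
             (base.getD r []).getD pref.length "" ::
               (fillSeg (base.getD r []) hc k (pref.length+1) ((base.getD r []).getD pref.length "")).2) := by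
        simp only [fillSeg, if_pos hne]
      rw [hfs]
      have harr : pref.length + (k + 1) = (pref.length + 1) + k := by omega
      rw [harr]
      simp
    · rw [if_neg hne]
      by_cases h2 : last ≠ "" ∧ hc pref.length
      · rw [if_pos h2, hsucc, hend]
        rw [ih (pref.length+1) last (pref ++ [last]) (by simp) (by omega)]
        have hfs : fillSeg (base.getD r []) hc (k+1) pref.length last
            = (((fillSeg (base.getD r []) hc k (pref.length+1) last).1),
               last :: (fillSeg (base.getD r []) hc k (pref.length+1) last).2) := by
          simp only [fillSeg, if_neg hne, if_pos h2]
        rw [hfs]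
        have harr : pref.length + (k + 1) = (pref.length + 1) + k := by omega
        rw [harr]
        simp
      · rw [if_neg h2, hsucc, hend]
        have hP : pref ++ (base.getD r []).drop pref.length
            = (pref ++ [(base.getD r []).getD pref.length ""]) ++ (base.getD r []).drop (pref.length+1) := by
          rw [hdrop]; simp
        rw [hP, ih (pref.length+1) last (pref ++ [(base.getD r []).getD pref.length ""])
              (by simp) (by omega)]
        have hfs : fillSeg (base.getD r []) hc (k+1) pref.length last
            = (((fillSeg (base.getD r []) hc k (pref.length+1) last).1),
               (base.getD r []).getD pref.length "" :: (fillSeg (base.getD r []) hc k (pref.length+1) last).2) := by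
          simp only [fillSeg, if_neg hne, if_neg h2]
        rw [hfs]
        have harr : pref.length + (k + 1) = (pref.length + 1) + k := by omega
        rw [harr]
        simp

theorem refTake_getD_ge (rows : List (List String)) (nCols m i : Nat)
    (hm : m ≤ i) (hi : i < rows.length) :
    (refTake rows nCols m).getD i [] = rows.getD i [] := by
  have hmr : m ≤ rows.length := le_trans hm (le_of_lt hi)
  have h1 := drop_eq_getD_cons (refTake rows nCols m) i
      (by rw [refTake_length rows nCols m hmr]; exact hi) []
  have h2 := drop_eq_getD_cons rows i hi []
  rw [refTake_drop rows nCols m i hm hmr, h2] at h1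
  exact (List.cons.injEq _ _ _ _ ▸ h1).1.symm

-- what A's per-cell `any` rescan computes, at row m of the partially processed table
theorem hhc_refTake (rows : List (List String)) (nCols m : Nat) (hm1 : m + 1 ≤ rows.length) :
    ∀ (c : Nat) (X : List String),
      ((PySem.List.pyRange ((m : Int) + 1) (((refTake rows nCols m).length : Int)) 1).any
        (fun childRow =>
          PySem.List.pyGetD
            (PySem.List.pyGetD (PySem.List.pySetD (refTake rows nCols m) (m : Int) X) childRow [])
            (c : Int) "" ≠ ""))
      = hcOrig rows m c := by
  intro c X
  have hmr : m ≤ rows.length := by omega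
  have hcongr : ∀ j ∈ PySem.List.pyRange ((m : Int) + 1) (((refTake rows nCols m).length : Int)) 1,
      (decide (PySem.List.pyGetD
          (PySem.List.pyGetD (PySem.List.pySetD (refTake rows nCols m) (m : Int) X) j []) (c : Int) "" ≠ ""))
      = (decide (PySem.List.pyGetD (PySem.List.pyGetD (refTake rows nCols m) j []) (c : Int) "" ≠ "")) := by
    intro j hj
    rw [PySem.List.mem_pyRange_one] at hj
    have hj0 : 0 ≤ j := by omega
    have hjn : j = ((j.toNat : Nat) : Int) := by omega
    rw [hjn, PySem.List.pyGetD_pySetD_natCast _ m j.toNat X [] (by rw [refTake_length rows nCols m hmr]; omega),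
        if_neg (by omega)]
  rw [PySem.List.any_congr_mem hcongr]
  have hcast : ((m : Int) + 1) = (((m + 1 : Nat)) : Int) := by push_cast; ring
  rw [hcast, any_pyRange_drop (refTake rows nCols m) (m+1)
        (fun rv => decide (PySem.List.pyGetD rv (c : Int) "" ≠ ""))]
  rw [refTake_drop rows nCols m (m+1) (by omega) hmr]
  unfold hcOrig
  apply PySem.List.any_congr_mem
  intro rv _
  rw [PySem.List.pyGetD_natCast]

-- A's outer loop invariant
theorem outerA (rows : List (List String)) (nCols : Nat)
    (hlen : ∀ row ∈ rows, nCols ≤ row.length) :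
    ∀ (m : Nat), m + 1 ≤ rows.length →
    (PySem.List.pyRange 0 (m : Int) 1).foldl (fun filled rowIdx =>
      ((PySem.List.pyRange 0 (nCols : Int) 1).foldl
        (pvStepA rowIdx (rows.length : Int)) ("", filled)).2) rows
    = refTake rows nCols m := by
  intro m
  induction m with
  | zero =>
    intro _
    have h0 : PySem.List.pyRange 0 (((0:Nat)) : Int) 1 = [] :=
      PySem.List.pyRange_one_eq_nil (by norm_num)
    rw [h0]
    simp [refTake]
  | succ m ih =>
    intro hm2
    have hm1 : m + 1 ≤ rows.length := by omega
    have hcast : ((m + 1 : Nat) : Int) = ((m : Int) + 1) := by push_cast; ring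
    rw [hcast, PySem.List.pyRange_one_succ_right (by positivity), List.foldl_append, ih hm1,
        List.foldl_cons, List.foldl_nil]
    have hrowm : (refTake rows nCols m).getD m [] = rows.getD m [] :=
      refTake_getD_ge rows nCols m m le_rfl (by omega)
    have hr : m < (refTake rows nCols m).length := by
      rw [refTake_length rows nCols m (by omega)]; omega
    have hbase : PySem.List.pySetD (refTake rows nCols m) (m : Int)
        ([] ++ ((refTake rows nCols m).getD m []).drop 0) = refTake rows nCols m := by
      simp only [List.nil_append, List.drop_zero, PySem.List.pySetD_natCast]
      rw [List.getD_eq_getElem _ _ hr, List.set_getElem_self]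
    have hmem : rows.getD m [] ∈ rows := by
      rw [List.getD_eq_getElem _ _ (by omega : m < rows.length)]
      exact List.getElem_mem _
    have key := innerA (refTake rows nCols m) m hr (hcOrig rows m)
        (hhc_refTake rows nCols m hm1) nCols 0 "" [] rfl
        (by rw [hrowm]; have := hlen (rows.getD m []) hmem; omega)
    rw [hbase, refTake_length rows nCols m (by omega)] at key
    simp only [Nat.cast_zero, Nat.zero_add] at key
    rw [key]
    rw [PySem.List.pySetD_natCast]
    have hfill : [] ++ (fillSeg ((refTake rows nCols m).getD m []) (hcOrig rows m) nCols 0 "").2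
        ++ ((refTake rows nCols m).getD m []).drop nCols
        = fillRowRef rows nCols m (rows.getD m []) := by
      rw [hrowm]
      simp [fillRowRef]
    rw [hfill]
    unfold refTake
    have hdropm : rows.drop m = rows.getD m [] :: rows.drop (m+1) :=
      drop_eq_getD_cons rows m (by omega) []
    have hlenmap : ((rows.take m).zipIdx.map (fun p => fillRowRef rows nCols p.2 p.1)).length = m := by
      simp [min_eq_left (show m ≤ rows.length by omega)]
    have hset := set_append_len ((rows.take m).zipIdx.map (fun p => fillRowRef rows nCols p.2 p.1))
        (rows.drop m) (fillRowRef rows nCols m (rows.getD m []))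
    rw [hlenmap] at hset
    rw [hset]
    rw [hdropm, List.set_cons_zero]
    have htake : (rows.take (m+1)).zipIdx = (rows.take m).zipIdx ++ [(rows.getD m [], m)] := by
      rw [List.take_add_one, List.getElem?_eq_getElem (by omega : m < rows.length)]
      simp only [Option.toList_some, List.zipIdx_append, List.zipIdx_singleton]
      rw [List.getD_eq_getElem _ _ (by omega : m < rows.length)]
      congr 2
      simp [min_eq_left (show m ≤ rows.length by omega)]
    rw [htake, List.map_append]
    simp

-- A's port, closed form
theorem portA_eq (rows : List (List String)) (h2 : ¬ rows.length < 2)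
    (hlen : ∀ row ∈ rows, (rows.headD []).length ≤ row.length) :
    forward_fill_parent_headers_py rows
      = refTake rows (rows.headD []).length (rows.length - 1) := by
  unfold forward_fill_parent_headers_py
  rw [if_neg h2]
  simp only [List.map_id']
  have hne : rows ≠ [] := by intro h; rw [h] at h2; simp at h2
  rw [if_pos hne]
  have hcast : ((rows.length : Int) - 1) = ((rows.length - 1 : Nat) : Int) := by
    have : 2 ≤ rows.length := by omega
    omega
  rw [hcast]
  exact outerA rows (rows.headD []).length hlen (rows.length - 1) (by omega)

-- one row of B = one row of the reference
theorem rowB_eq (rows : List (List String)) (nCols i : Nat) (row : List String)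
    (hi : i < rows.length) :
    pvFillRow row ((pvBelowTables rows.reverse (List.replicate nCols false)).reverse.getD i []) nCols
      = fillRowRef rows nCols i row := by
  rw [pvFillRow_eq]
  unfold fillRowRef
  congr 1
  have hcg := fillSeg_congr row
      (fun j => ((pvBelowTables rows.reverse (List.replicate nCols false)).reverse.getD i []).getD j false)
      (hcOrig rows i) nCols 0 ""
      (fun j _ hj => tables_getD rows nCols i j hi (by omega))
  rw [hcg]

-- B's port, closed form
theorem portB_eq (rows : List (List String)) (h2 : ¬ rows.length < 2) :
    forward_fill_parent_headers_py_alt rows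
      = refTake rows (rows.headD []).length (rows.length - 1) := by
  unfold forward_fill_parent_headers_py_alt
  rw [if_neg h2]
  have hn1 : rows.length - 1 < rows.length := by omega
  have hdrop1 : rows.drop (rows.length - 1) = [rows.getD (rows.length - 1) []] := by
    rw [drop_eq_getD_cons rows (rows.length - 1) hn1 []]
    have : rows.length - 1 + 1 = rows.length := by omega
    rw [this, List.drop_length]
  have hsplit : rows.zipIdx
      = (rows.take (rows.length - 1)).zipIdx
        ++ [(rows.getD (rows.length - 1) [], rows.length - 1)] := by
    conv_lhs => rw [← List.take_append_drop (rows.length - 1) rows]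
    rw [List.zipIdx_append, hdrop1, List.zipIdx_singleton]
    congr 2
    simp
  rw [hsplit, List.map_append]
  unfold refTake
  rw [hdrop1]
  congr 1
  · apply List.map_congr_left
    intro p hp
    obtain ⟨x, i⟩ := p
    obtain ⟨-, hilt, hx⟩ := List.mem_zipIdx hp
    have hitk : i < rows.length - 1 := by
      simpa [min_eq_left (le_of_lt hn1)] using hilt
    rw [if_neg (by simp; omega)]
    exact rowB_eq rows (rows.headD []).length i x (by omega)
  · rw [List.map_cons, List.map_nil, if_pos rfl]

-- ===== VERDICT (by name: the statement is the Claim_ definition above) =====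
theorem forward_fill_parent_headers_py_spec : Claim_equal_forward_fill_parent_headers_py := by
  unfold Claim_equal_forward_fill_parent_headers_py
  intro rows _ hpre
  unfold Spec_forward_fill_parent_headers_py
  by_cases h2 : rows.length < 2
  · unfold forward_fill_parent_headers_py forward_fill_parent_headers_py_alt
    rw [if_pos h2, if_pos h2]
  · have hlen : ∀ row ∈ rows, (rows.headD []).length ≤ row.length := by
      cases hpre with
      | inl h => exact absurd h h2
      | inr h => exact h
    rw [portA_eq rows h2 hlen, portB_eq rows h2]
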